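-- pv_equiv track=rewrite | github.com/donnavld/python-project-50 | modules/script/compare_files.py | diff_plain_dicts
-- ===== SOURCE A (Python) =====
-- def diff_plain_dicts(d1, d2):
--     result = []
--     keys1 = set(d1.keys())
--     keys2 = set(d2.keys())
--     for key in sorted(keys1 & keys2):
--         if d1[key] != d2[key]:
--             result.append(f"- {key}: {d1[key]}")
--             result.append(f"+ {key}: {d2[key]}")
--         else:
--             # Если значения совпадают, можно не выводить или выводить без знака
--             result.append(f"  {key}: {d1[key]}")
--
--     # Ключи, которые есть только в d1 (удалены)
--     for key in sorted(keys1 - keys2):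
--         result.append(f"- {key}: {d1[key]}")
--
--     # Ключи, которые есть только в d2 (добавлены)
--     for key in sorted(keys2 - keys1):
--         result.append(f"+ {key}: {d2[key]}")
--
--     return "\n".join(result)
-- ===== SOURCE B (Python) =====
-- def diff_plain_dicts(d1, d2):
--     common, removed, added = [], [], []
--     for key in sorted(set(d1) | set(d2)):
--         if key in d1 and key in d2:
--             v1, v2 = d1[key], d2[key]
--             if v1 == v2:
--                 common.append(f"  {key}: {v1}")
--             else:
--                 common.append(f"- {key}: {v1}")
--                 common.append(f"+ {key}: {v2}")
--         elif key in d1: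
--             removed.append(f"- {key}: {d1[key]}")
--         else:
--             added.append(f"+ {key}: {d2[key]}")
--     return "\n".join(common + removed + added)
-- ===== Notes on version B (the rewrite author's own statement) =====
-- stated objective: simpler
-- what changed: Replaces the three set-algebra passes (sorted intersection, sorted difference, sorted reverse difference) by one pass over the sorted key union that buckets each key into common/removed/added accumulators, joined in that order.
import Mathlib
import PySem

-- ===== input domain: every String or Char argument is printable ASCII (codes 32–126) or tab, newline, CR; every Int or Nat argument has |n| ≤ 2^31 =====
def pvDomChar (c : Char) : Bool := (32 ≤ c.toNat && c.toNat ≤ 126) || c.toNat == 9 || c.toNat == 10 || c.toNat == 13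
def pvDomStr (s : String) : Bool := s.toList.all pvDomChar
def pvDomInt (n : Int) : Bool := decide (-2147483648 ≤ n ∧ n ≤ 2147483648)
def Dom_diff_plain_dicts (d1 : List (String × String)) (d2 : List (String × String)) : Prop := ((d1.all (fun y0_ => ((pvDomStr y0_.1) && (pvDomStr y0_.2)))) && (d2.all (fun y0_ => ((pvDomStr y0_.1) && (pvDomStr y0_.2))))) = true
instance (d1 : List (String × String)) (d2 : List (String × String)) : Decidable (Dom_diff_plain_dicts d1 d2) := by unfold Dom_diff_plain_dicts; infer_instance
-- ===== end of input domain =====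

-- B replaces A's three set-algebra passes (sorted ∩, sorted d1−d2, sorted d2−d1) by ONE pass over the
-- sorted key union bucketing each key into common/removed/added accumulators (objective: simpler).

-- ===== PORT A =====
-- Python dict arguments: built with PySem.Dict.ofList (duplicate keys overwrite, Python dict(...) semantics).
-- d1[key] is ported as getD key "": every key looked up by A is present in that dict.
def diff_plain_dicts (d1 : List (String × String)) (d2 : List (String × String)) : String :=
  let dd1 := PySem.Dict.ofList d1
  let dd2 := PySem.Dict.ofList d2
  let keys1 : PySem.Set String := PySem.Set.ofList dd1.keys
  let keys2 : PySem.Set String := PySem.Set.ofList dd2.keys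
  let result :=
    (PySem.List.sorted (PySem.Set.inter keys1 keys2) (fun x => x) false).foldl
      (fun result key =>
        if dd1.getD key "" != dd2.getD key "" then
          (result ++ ["- " ++ key ++ ": " ++ dd1.getD key ""]) ++ ["+ " ++ key ++ ": " ++ dd2.getD key ""]
        else
          result ++ ["  " ++ key ++ ": " ++ dd1.getD key ""]) []
  let result :=
    (PySem.List.sorted (PySem.Set.diff keys1 keys2) (fun x => x) false).foldl
      (fun result key => result ++ ["- " ++ key ++ ": " ++ dd1.getD key ""]) result
  let result :=
    (PySem.List.sorted (PySem.Set.diff keys2 keys1) (fun x => x) false).foldl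
      (fun result key => result ++ ["+ " ++ key ++ ": " ++ dd2.getD key ""]) result
  PySem.Str.join "\n" result

-- ===== PORT B =====
def diff_plain_dicts_alt (d1 : List (String × String)) (d2 : List (String × String)) : String :=
  let dd1 := PySem.Dict.ofList d1
  let dd2 := PySem.Dict.ofList d2
  let fin :=
    (PySem.List.sorted
        (PySem.Set.union (PySem.Set.ofList dd1.keys) (PySem.Set.ofList dd2.keys))
        (fun x => x) false).foldl
      (fun st key =>
        if dd1.contains key && dd2.contains key then
          if dd1.getD key "" == dd2.getD key "" then
            (st.1 ++ ["  " ++ key ++ ": " ++ dd1.getD key ""], st.2.1, st.2.2)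
          else
            (st.1 ++ ["- " ++ key ++ ": " ++ dd1.getD key "", "+ " ++ key ++ ": " ++ dd2.getD key ""], st.2.1, st.2.2)
        else if dd1.contains key then
          (st.1, st.2.1 ++ ["- " ++ key ++ ": " ++ dd1.getD key ""], st.2.2)
        else
          (st.1, st.2.1, st.2.2 ++ ["+ " ++ key ++ ": " ++ dd2.getD key ""]))
      ([], [], [])
  PySem.Str.join "\n" (fin.1 ++ fin.2.1 ++ fin.2.2)

-- ===== PRECONDITION & SPEC =====
def Spec_diff_plain_dicts (d1 : List (String × String)) (d2 : List (String × String)) (out : String) : Prop := out = diff_plain_dicts_alt d1 d2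
instance (d1 : List (String × String)) (d2 : List (String × String)) (out : String) : Decidable (Spec_diff_plain_dicts d1 d2 out) := by unfold Spec_diff_plain_dicts; infer_instance

-- ===== CLAIM (what is proved, stated in full; the proofs are below) =====
def Claim_equal_diff_plain_dicts : Prop := ∀ (d1 : List (String × String)) (d2 : List (String × String)), Dom_diff_plain_dicts d1 d2 → Spec_diff_plain_dicts d1 d2 (diff_plain_dicts d1 d2)

-- ===== LEMMAS AND PROOFS =====

-- the three line-groups as functions of a key
def gEq (dd1 dd2 : PySem.Dict String String) (k : String) : List String :=
  if dd1.getD k "" == dd2.getD k "" then ["  " ++ k ++ ": " ++ dd1.getD k ""]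
  else ["- " ++ k ++ ": " ++ dd1.getD k "", "+ " ++ k ++ ": " ++ dd2.getD k ""]

def gDel (dd1 : PySem.Dict String String) (k : String) : List String :=
  ["- " ++ k ++ ": " ++ dd1.getD k ""]

def gAdd (dd2 : PySem.Dict String String) (k : String) : List String :=
  ["+ " ++ k ++ ": " ++ dd2.getD k ""]

-- A's first loop is a flatMap of gEq
lemma afold1 (dd1 dd2 : PySem.Dict String String) (xs : List String) (acc : List String) :
    xs.foldl
      (fun result key =>
        if dd1.getD key "" != dd2.getD key "" then
          (result ++ ["- " ++ key ++ ": " ++ dd1.getD key ""]) ++ ["+ " ++ key ++ ": " ++ dd2.getD key ""]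
        else
          result ++ ["  " ++ key ++ ": " ++ dd1.getD key ""]) acc
    = acc ++ xs.flatMap (gEq dd1 dd2) := by
  have h : (fun (result : List String) key =>
        if dd1.getD key "" != dd2.getD key "" then
          (result ++ ["- " ++ key ++ ": " ++ dd1.getD key ""]) ++ ["+ " ++ key ++ ": " ++ dd2.getD key ""]
        else
          result ++ ["  " ++ key ++ ": " ++ dd1.getD key ""])
      = fun result key => result ++ gEq dd1 dd2 key := by
    funext res k
    by_cases h : (dd1.getD k "" == dd2.getD k "") = true <;> simp [gEq, bne, h]
  rw [h, PySem.List.foldl_append_eq_flatMap]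

-- A's second and third loops are flatMaps of gDel / gAdd
lemma afold2 (dd1 : PySem.Dict String String) (xs : List String) (acc : List String) :
    xs.foldl (fun result key => result ++ ["- " ++ key ++ ": " ++ dd1.getD key ""]) acc
    = acc ++ xs.flatMap (gDel dd1) :=
  PySem.List.foldl_append_eq_flatMap (gDel dd1) xs acc

lemma afold3 (dd2 : PySem.Dict String String) (xs : List String) (acc : List String) :
    xs.foldl (fun result key => result ++ ["+ " ++ key ++ ": " ++ dd2.getD key ""]) acc
    = acc ++ xs.flatMap (gAdd dd2) :=
  PySem.List.foldl_append_eq_flatMap (gAdd dd2) xs acc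

-- B's single loop, characterised: three independent buckets
lemma bfold (dd1 dd2 : PySem.Dict String String) (xs : List String) (c r a : List String) :
    xs.foldl
      (fun st key =>
        if dd1.contains key && dd2.contains key then
          if dd1.getD key "" == dd2.getD key "" then
            (st.1 ++ ["  " ++ key ++ ": " ++ dd1.getD key ""], st.2.1, st.2.2)
          else
            (st.1 ++ ["- " ++ key ++ ": " ++ dd1.getD key "", "+ " ++ key ++ ": " ++ dd2.getD key ""], st.2.1, st.2.2)
        else if dd1.contains key then
          (st.1, st.2.1 ++ ["- " ++ key ++ ": " ++ dd1.getD key ""], st.2.2)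
        else
          (st.1, st.2.1, st.2.2 ++ ["+ " ++ key ++ ": " ++ dd2.getD key ""]))
      (c, r, a)
    = (c ++ (xs.filter (fun k => dd1.contains k && dd2.contains k)).flatMap (gEq dd1 dd2),
       r ++ (xs.filter (fun k => !(dd1.contains k && dd2.contains k) && dd1.contains k)).flatMap (gDel dd1),
       a ++ (xs.filter (fun k => !(dd1.contains k && dd2.contains k) && !dd1.contains k)).flatMap (gAdd dd2)) := by
  induction xs generalizing c r a with
  | nil => simp
  | cons k t ih =>
    simp only [List.foldl_cons, List.filter_cons]
    by_cases h1 : (dd1.contains k && dd2.contains k) = true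
    · by_cases h2 : (dd1.getD k "" == dd2.getD k "") = true
      · rw [if_pos h1, if_pos h2, ih]
        simp [h1, h2, gEq]
      · rw [if_pos h1, if_neg h2, ih]
        simp [h1, h2, gEq]
    · by_cases h3 : dd1.contains k = true
      · have h4 : dd2.contains k = false := by
          cases h2 : dd2.contains k
          · rfl
          · exact absurd (by simp [h3, h2]) h1
        rw [if_neg h1, if_pos h3, ih]
        simp [h3, h4, gDel]
      · rw [if_neg h1, if_neg h3, ih]
        simp [h3, gAdd]

-- filtering a strict sort of a duplicate-free list = sorting the filtered list
lemma filter_sorted (xs : List String) (p : String → Bool) (hnd : xs.Nodup) :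
    (PySem.List.sorted xs (fun x => x) false).filter p
      = PySem.List.sorted (xs.filter p) (fun x => x) false := by
  refine (PySem.List.sorted_eq_of_perm_of_pairwise_lt _ _ _ ?_ ?_).symm
  · exact ((PySem.List.sorted_perm xs _ false).filter p)
  · have hle := PySem.List.sorted_pairwise xs (fun x => x)
    have hnd' : (PySem.List.sorted xs (fun x => x) false).Nodup :=
      ((PySem.List.sorted_perm xs _ false).nodup_iff).mpr hnd
    have hlt : (PySem.List.sorted xs (fun x => x) false).Pairwise (fun a b => a < b) :=
      (hle.and hnd').imp (fun h => lt_of_le_of_ne h.1 h.2)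
    exact hlt.filter p

-- membership bridges
lemma mem_keys1_contains (dd : PySem.Dict String String) (k : String)
    (h : k ∈ PySem.Set.ofList dd.keys) : dd.contains k = true :=
  (PySem.Dict.contains_iff_mem_keys dd k).mpr ((PySem.Set.mem_ofList _ _).mp h)

lemma set_contains_eq (dd : PySem.Dict String String) (k : String) :
    (PySem.Set.ofList dd.keys).contains k = dd.contains k := by
  rw [Bool.eq_iff_iff, PySem.Set.contains_iff, PySem.Set.mem_ofList,
    PySem.Dict.contains_iff_mem_keys]

-- the union split into appended halves
lemma union_split (dd1 dd2 : PySem.Dict String String) :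
    PySem.Set.union (PySem.Set.ofList dd1.keys) (PySem.Set.ofList dd2.keys)
      = PySem.Set.ofList dd1.keys
        ++ (PySem.Set.ofList dd2.keys).filter
            (fun y => !(PySem.Set.ofList dd1.keys).contains y) := by
  show PySem.Set.update _ _ = _
  rw [PySem.Set.update_eq_append_filter, PySem.Set.ofList_ofList]

lemma union_filter_both (dd1 dd2 : PySem.Dict String String) :
    (PySem.Set.union (PySem.Set.ofList dd1.keys) (PySem.Set.ofList dd2.keys)).filter
        (fun k => dd1.contains k && dd2.contains k)
      = PySem.Set.inter (PySem.Set.ofList dd1.keys) (PySem.Set.ofList dd2.keys) := by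
  rw [union_split, List.filter_append]
  have h1 : (PySem.Set.ofList dd1.keys).filter (fun k => dd1.contains k && dd2.contains k)
      = (PySem.Set.ofList dd1.keys).filter (fun k => (PySem.Set.ofList dd2.keys).contains k) := by
    refine List.filter_congr (fun k hk => ?_)
    rw [mem_keys1_contains dd1 k hk, set_contains_eq, Bool.true_and]
  have h2 : ((PySem.Set.ofList dd2.keys).filter
        (fun y => !(PySem.Set.ofList dd1.keys).contains y)).filter
        (fun k => dd1.contains k && dd2.contains k) = [] := by
    rw [List.filter_eq_nil_iff]
    intro k hk
    have := (List.mem_filter.mp hk).2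
    rw [set_contains_eq] at this
    simp only [Bool.not_eq_eq_eq_not, Bool.not_true] at this
    simp [this]
  rw [h1, h2, List.append_nil]
  rfl

lemma union_filter_del (dd1 dd2 : PySem.Dict String String) :
    (PySem.Set.union (PySem.Set.ofList dd1.keys) (PySem.Set.ofList dd2.keys)).filter
        (fun k => !(dd1.contains k && dd2.contains k) && dd1.contains k)
      = PySem.Set.diff (PySem.Set.ofList dd1.keys) (PySem.Set.ofList dd2.keys) := by
  rw [union_split, List.filter_append]
  have h1 : (PySem.Set.ofList dd1.keys).filter
        (fun k => !(dd1.contains k && dd2.contains k) && dd1.contains k)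
      = (PySem.Set.ofList dd1.keys).filter (fun k => !(PySem.Set.ofList dd2.keys).contains k) := by
    refine List.filter_congr (fun k hk => ?_)
    rw [mem_keys1_contains dd1 k hk, set_contains_eq]
    cases dd2.contains k <;> rfl
  have h2 : ((PySem.Set.ofList dd2.keys).filter
        (fun y => !(PySem.Set.ofList dd1.keys).contains y)).filter
        (fun k => !(dd1.contains k && dd2.contains k) && dd1.contains k) = [] := by
    rw [List.filter_eq_nil_iff]
    intro k hk
    have := (List.mem_filter.mp hk).2
    rw [set_contains_eq] at this
    simp only [Bool.not_eq_eq_eq_not, Bool.not_true] at this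
    simp [this]
  rw [h1, h2, List.append_nil]
  rfl

lemma union_filter_add (dd1 dd2 : PySem.Dict String String) :
    (PySem.Set.union (PySem.Set.ofList dd1.keys) (PySem.Set.ofList dd2.keys)).filter
        (fun k => !(dd1.contains k && dd2.contains k) && !dd1.contains k)
      = PySem.Set.diff (PySem.Set.ofList dd2.keys) (PySem.Set.ofList dd1.keys) := by
  rw [union_split, List.filter_append]
  have h1 : (PySem.Set.ofList dd1.keys).filter
        (fun k => !(dd1.contains k && dd2.contains k) && !dd1.contains k) = [] := by
    rw [List.filter_eq_nil_iff]
    intro k hk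
    have := mem_keys1_contains dd1 k hk
    simp [this]
  have h2 : ((PySem.Set.ofList dd2.keys).filter
        (fun y => !(PySem.Set.ofList dd1.keys).contains y)).filter
        (fun k => !(dd1.contains k && dd2.contains k) && !dd1.contains k)
      = (PySem.Set.ofList dd2.keys).filter
        (fun y => !(PySem.Set.ofList dd1.keys).contains y) := by
    rw [List.filter_eq_self]
    intro k hk
    have := (List.mem_filter.mp hk).2
    rw [set_contains_eq] at this
    simp only [Bool.not_eq_eq_eq_not, Bool.not_true] at this
    simp [this]
  rw [h1, h2, List.nil_append]
  rfl

-- ===== VERDICT (by name: the statement is the Claim_ definition above) =====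
theorem diff_plain_dicts_spec : Claim_equal_diff_plain_dicts := by
  intro d1 d2 _
  show diff_plain_dicts d1 d2 = diff_plain_dicts_alt d1 d2
  simp only [diff_plain_dicts, diff_plain_dicts_alt]
  set dd1 := PySem.Dict.ofList d1 with hdd1
  set dd2 := PySem.Dict.ofList d2 with hdd2
  have hnd : (PySem.Set.union (PySem.Set.ofList dd1.keys) (PySem.Set.ofList dd2.keys)).Nodup :=
    PySem.Set.nodup_union _ _ (PySem.Set.nodup_ofList _)
  rw [bfold, afold1, afold2, afold3,
    filter_sorted _ _ hnd, filter_sorted _ _ hnd, filter_sorted _ _ hnd,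
    union_filter_both, union_filter_del, union_filter_add]
  simp [List.append_assoc]
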